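-- pv_equiv track=rewrite | github.com/nghiahsgs/practice-hacker-rank-everyday | test.py | checkSubsetDivide
-- ===== SOURCE A (Python) =====
-- def checkSubsetDivide(sub_set, k):
--     #sub_set => (1,7,2,4)
--     # k= 3
--     for i in range(len(sub_set)):
--         e1 = sub_set[i]
--         for j in range(i+1, len(sub_set)):
--             e2 = sub_set[j]
--             if((e1+e2) % k == 0):
--                 return False
--     return True
-- ===== SOURCE B (Python) =====
-- def checkSubsetDivide(sub_set, k):
--     # One forward pass: keep the set of remainders mod k seen so far;
--     # a pair sums to a multiple of k iff the complement of the current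
--     # remainder was already seen.
--     if len(sub_set) < 2:
--         return True
--     seen = set()
--     for x in sub_set:
--         r = x % k
--         if (-r) % k in seen:
--             return False
--         seen.add(r)
--     return True
-- ===== Notes on version B (the rewrite author's own statement) =====
-- stated objective: faster
-- what changed: Replaces the O(n^2) all-pairs scan by a single pass that stores remainders mod k in a set and tests the complementary remainder.
import Mathlib
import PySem

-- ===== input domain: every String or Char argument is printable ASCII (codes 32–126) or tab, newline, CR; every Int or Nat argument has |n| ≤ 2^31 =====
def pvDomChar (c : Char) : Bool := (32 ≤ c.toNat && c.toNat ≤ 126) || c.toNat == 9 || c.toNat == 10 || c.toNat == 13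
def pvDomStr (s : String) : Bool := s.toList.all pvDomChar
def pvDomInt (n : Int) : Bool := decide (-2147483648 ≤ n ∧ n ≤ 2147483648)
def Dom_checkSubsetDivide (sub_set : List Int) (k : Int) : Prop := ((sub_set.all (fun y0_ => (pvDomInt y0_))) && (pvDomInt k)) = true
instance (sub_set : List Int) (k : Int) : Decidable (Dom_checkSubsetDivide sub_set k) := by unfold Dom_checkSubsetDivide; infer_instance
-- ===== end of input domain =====

-- B replaces A's O(n^2) all-pairs scan by a single pass storing remainders mod k in a set
-- and testing the complementary remainder (objective: faster).


-- ===== PORT A =====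
-- inner loop: 'for j in range(i+1, len(sub_set)): e2 = sub_set[j]; if (e1+e2) % k == 0: return False'
-- (indices j come from range, hence always valid; pyGetD's default is never used)
def pvAInner (sub_set : List Int) (k e1 : Int) : List Int → Bool
  | [] => true
  | j :: js =>
    let e2 := PySem.List.pyGetD sub_set j 0
    if PySem.Int.mod (e1 + e2) k = 0 then false
    else pvAInner sub_set k e1 js

-- outer loop: 'for i in range(len(sub_set)): e1 = sub_set[i]; …'
def pvAOuter (sub_set : List Int) (k : Int) : List Int → Bool
  | [] => true
  | i :: is =>
    let e1 := PySem.List.pyGetD sub_set i 0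
    if pvAInner sub_set k e1 (PySem.List.pyRange (i + 1) sub_set.length 1) then
      pvAOuter sub_set k is
    else false

def checkSubsetDivide (sub_set : List Int) (k : Int) : Bool :=
  pvAOuter sub_set k (PySem.List.pyRange 0 sub_set.length 1)

-- ===== PORT B =====
-- 'for x in sub_set: r = x % k; if (-r) % k in seen: return False; seen.add(r)'
def pvAltLoop (k : Int) (seen : PySem.Set Int) : List Int → Bool
  | [] => true
  | x :: rest =>
    let r := PySem.Int.mod x k
    if PySem.Set.contains seen (PySem.Int.mod (-r) k) then false
    else pvAltLoop k (PySem.Set.add seen r) rest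

def checkSubsetDivide_alt (sub_set : List Int) (k : Int) : Bool :=
  if sub_set.length < 2 then true
  else pvAltLoop k PySem.Set.empty sub_set

-- ===== PRECONDITION & SPEC =====
-- Pre_ excludes exactly the inputs where Python A raises ZeroDivisionError:
-- k = 0 with at least two elements (with fewer than two elements no '%' is evaluated).
def Pre_checkSubsetDivide (sub_set : List Int) (k : Int) : Prop :=
  k ≠ 0 ∨ sub_set.length ≤ 1
instance (sub_set : List Int) (k : Int) : Decidable (Pre_checkSubsetDivide sub_set k) := by
  unfold Pre_checkSubsetDivide; infer_instance

def pvWitness_checkSubsetDivide : List Int × Int := ([1, 7, 2, 4], 3)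

def Spec_checkSubsetDivide (sub_set : List Int) (k : Int) (out : Bool) : Prop := out = checkSubsetDivide_alt sub_set k
instance (sub_set : List Int) (k : Int) (out : Bool) : Decidable (Spec_checkSubsetDivide sub_set k out) := by unfold Spec_checkSubsetDivide; infer_instance

-- ===== CLAIM (what is proved, stated in full; the proofs are below) =====
def Claim_equal_checkSubsetDivide : Prop := ∀ (sub_set : List Int) (k : Int), Dom_checkSubsetDivide sub_set k → Pre_checkSubsetDivide sub_set k → Spec_checkSubsetDivide sub_set k (checkSubsetDivide sub_set k)

-- ===== LEMMAS AND PROOFS =====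

-- reference form both ports are reduced to: x is checked against every later element
def pvNoPair (k : Int) : List Int → Bool
  | [] => true
  | x :: rest =>
    !(rest.any fun y => decide (PySem.Int.mod (x + y) k = 0)) && pvNoPair k rest

-- k divides a - (a % k)  (Python mod)
theorem pv_dvd_sub_mod (a k : Int) : k ∣ (a - PySem.Int.mod a k) := by
  have h := PySem.Int.floordiv_mul_add_mod a k
  exact ⟨PySem.Int.floordiv a k, by linarith⟩

-- Python mod is injective on residue classes: equal mods ↔ k divides the difference
theorem pv_mod_inj (a b k : Int) (hk : k ≠ 0) :
    PySem.Int.mod a k = PySem.Int.mod b k ↔ k ∣ (a - b) := by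
  constructor
  · intro h
    have h1 := pv_dvd_sub_mod a k
    have h2 := pv_dvd_sub_mod b k
    have : k ∣ ((a - PySem.Int.mod a k) - (b - PySem.Int.mod b k)) := dvd_sub h1 h2
    have heq : (a - PySem.Int.mod a k) - (b - PySem.Int.mod b k) = a - b := by
      rw [h]; ring
    rwa [heq] at this
  · intro h
    have h1 := pv_dvd_sub_mod a k
    have h2 := pv_dvd_sub_mod b k
    have hd : k ∣ (PySem.Int.mod a k - PySem.Int.mod b k) := by
      have : k ∣ ((a - b) - ((a - PySem.Int.mod a k) - (b - PySem.Int.mod b k))) :=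
        dvd_sub h (dvd_sub h1 h2)
      have heq : (a - b) - ((a - PySem.Int.mod a k) - (b - PySem.Int.mod b k))
          = PySem.Int.mod a k - PySem.Int.mod b k := by ring
      rwa [heq] at this
    have hz : PySem.Int.mod a k - PySem.Int.mod b k = 0 := by
      rcases lt_or_gt_of_ne hk with hneg | hpos
      · have ba := PySem.Int.mod_neg_bounds a hneg
        have bb := PySem.Int.mod_neg_bounds b hneg
        refine Int.eq_zero_of_abs_lt_dvd ((neg_dvd).mpr hd) ?_
        rw [abs_lt]; omega
      · have ba1 := PySem.Int.mod_nonneg a hpos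
        have ba2 := PySem.Int.mod_lt a hpos
        have bb1 := PySem.Int.mod_nonneg b hpos
        have bb2 := PySem.Int.mod_lt b hpos
        refine Int.eq_zero_of_abs_lt_dvd hd ?_
        rw [abs_lt]; omega
    omega

-- the key fact behind B: complement-remainder membership test = divisibility of the pair sum
theorem pv_comp_eq_iff (x y k : Int) (hk : k ≠ 0) :
    PySem.Int.mod (-(PySem.Int.mod x k)) k = PySem.Int.mod y k ↔ k ∣ (x + y) := by
  rw [pv_mod_inj _ _ _ hk]
  constructor
  · intro h
    have h1 := pv_dvd_sub_mod x k
    have : k ∣ ((x - PySem.Int.mod x k) - (-(PySem.Int.mod x k) - y)) := dvd_sub h1 h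
    have heq : (x - PySem.Int.mod x k) - (-(PySem.Int.mod x k) - y) = x + y := by ring
    rwa [heq] at this
  · intro h
    have h1 := pv_dvd_sub_mod x k
    have : k ∣ ((x - PySem.Int.mod x k) - (x + y)) := dvd_sub h1 h
    have heq : (x - PySem.Int.mod x k) - (x + y) = -(PySem.Int.mod x k) - y := by ring
    rwa [heq] at this

-- ---------- A-side characterisation ----------

theorem pvAInner_eq (sub_set : List Int) (k e1 : Int) (js : List Int) :
    pvAInner sub_set k e1 js
      = !(js.any fun j => decide (PySem.Int.mod (e1 + PySem.List.pyGetD sub_set j 0) k = 0)) := by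
  induction js with
  | nil => simp [pvAInner]
  | cons j js ih =>
    simp only [pvAInner, List.any_cons]
    split_ifs with h <;> simp [h, ih]

theorem pvAOuter_eq (sub_set : List Int) (k : Int) :
    ∀ (i : Nat), pvAOuter sub_set k (PySem.List.pyRange (i : Int) sub_set.length 1)
      = pvNoPair k (sub_set.drop i) := by
  intro i
  induction hn : sub_set.length - i generalizing i with
  | zero =>
    have hle : sub_set.length ≤ i := by omega
    rw [PySem.List.pyRange_one_eq_nil (by exact_mod_cast hle)]
    rw [List.drop_eq_nil_of_le hle]
    rfl
  | succ n ih =>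
    have hi : i < sub_set.length := by omega
    have hcast : ((i : Int) + 1) = ((i + 1 : Nat) : Int) := by push_cast; ring
    rw [PySem.List.pyRange_one_cons (by exact_mod_cast hi)]
    rw [List.drop_eq_getElem_cons hi]
    simp only [pvAOuter, pvNoPair, pvAInner_eq]
    have hget : PySem.List.pyGetD sub_set (i : Int) 0 = sub_set[i] := by
      rw [PySem.List.pyGetD_natCast]; exact List.getD_eq_getElem sub_set 0 hi
    have hm := PySem.List.map_pyGetD_pyRange' sub_set 0 (a := ((i + 1 : Nat) : Int)) (by positivity)
    simp only [Int.toNat_natCast] at hm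
    have hany : ((PySem.List.pyRange ((i : Int) + 1) (sub_set.length : Int) 1).any
          (fun j => decide (PySem.Int.mod (PySem.List.pyGetD sub_set (i : Int) 0 + PySem.List.pyGetD sub_set j 0) k = 0)))
        = ((sub_set.drop (i + 1)).any fun y => decide (PySem.Int.mod (sub_set[i] + y) k = 0)) := by
      rw [hcast, ← hm, List.any_map]
      simp [Function.comp_def, hget]
    rw [hany, hcast, ih (i + 1) (by omega)]
    split_ifs with h <;> simp_all

theorem pvA_char (sub_set : List Int) (k : Int) :
    checkSubsetDivide sub_set k = pvNoPair k sub_set := by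
  have h := pvAOuter_eq sub_set k 0
  simpa [checkSubsetDivide] using h

-- ---------- B-side characterisation ----------

theorem pvAltLoop_eq (k : Int) (hk : k ≠ 0) (xs : List Int) :
    ∀ (seen : PySem.Set Int),
      pvAltLoop k seen xs
        = (!(xs.any fun y => PySem.Set.contains seen (PySem.Int.mod (-(PySem.Int.mod y k)) k))
            && pvNoPair k xs) := by
  induction xs with
  | nil => intro seen; simp [pvAltLoop, pvNoPair]
  | cons x rest ih =>
    intro seen
    simp only [pvAltLoop]
    split_ifs with h
    · simp only [List.any_cons, h, Bool.true_or, Bool.not_true, Bool.false_and]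
    · rw [ih]
      have hmem : ∀ y : Int, PySem.Set.contains (PySem.Set.add seen (PySem.Int.mod x k))
            (PySem.Int.mod (-(PySem.Int.mod y k)) k)
          = (PySem.Set.contains seen (PySem.Int.mod (-(PySem.Int.mod y k)) k)
              || decide (PySem.Int.mod (x + y) k = 0)) := by
        intro y
        have hiff : PySem.Int.mod (-(PySem.Int.mod y k)) k = PySem.Int.mod x k
            ↔ PySem.Int.mod (x + y) k = 0 := by
          rw [pv_comp_eq_iff y x k hk, PySem.Int.mod_eq_zero_iff_dvd, add_comm x y]
        rw [Bool.eq_iff_iff]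
        simp [PySem.Set.mem_add, hiff]
      simp only [List.any_cons, pvNoPair, hmem, h, Bool.false_or]
      rw [Bool.eq_iff_iff]
      simp
      constructor
      · rintro ⟨hall, hn⟩
        exact ⟨fun z hz => (hall z hz).1, fun z hz => (hall z hz).2, hn⟩
      · rintro ⟨h1, h2, hn⟩
        exact ⟨fun z hz => ⟨h1 z hz, h2 z hz⟩, hn⟩

theorem pvB_char (sub_set : List Int) (k : Int) (hk : k ≠ 0) :
    checkSubsetDivide_alt sub_set k = pvNoPair k sub_set := by
  unfold checkSubsetDivide_alt
  split_ifs with h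
  · match sub_set, h with
    | [], _ => rfl
    | [x], _ => simp [pvNoPair]
  · rw [pvAltLoop_eq k hk]
    simp [PySem.Set.empty, PySem.Set.contains]

-- small-list case of the claim (k may be 0: no '%' is ever evaluated in Python)
theorem pv_short (sub_set : List Int) (k : Int) (h : sub_set.length ≤ 1) :
    checkSubsetDivide sub_set k = checkSubsetDivide_alt sub_set k := by
  match sub_set, h with
  | [], _ => rfl
  | [x], _ =>
    have hA : checkSubsetDivide [x] k = true := by
      unfold checkSubsetDivide
      have hl : ((([x] : List Int).length : Int)) = 1 := by simp
      rw [hl, PySem.List.pyRange_one_cons (by norm_num),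
        PySem.List.pyRange_one_eq_nil (by norm_num)]
      simp [pvAOuter, pvAInner]
    rw [hA]
    simp [checkSubsetDivide_alt]

-- ===== VERDICT (by name: the statement is the Claim_ definition above) =====
theorem checkSubsetDivide_spec : Claim_equal_checkSubsetDivide := by
  intro sub_set k _ hpre
  unfold Spec_checkSubsetDivide
  rcases hpre with hk | hshort
  · rw [pvA_char, pvB_char _ _ hk]
  · exact pv_short sub_set k hshort
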